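-- pv_equiv track=rewrite | github.com/ntt-dkiku/chaos-eater | chaos_eater/hypothesis/steady_states/steady_state_definer.py | _parse_agent_name
-- ===== SOURCE A (Python) =====
-- def _parse_agent_name(agent_name: str) -> tuple:
--     """Parse agent name to get ss_idx and step type"""
--     # Format: {step_type}_agent_{ss_idx} or {step_type}_{ss_idx}
--     parts = agent_name.rsplit("_", 1)
--     if len(parts) == 2 and parts[1].isdigit():
--         ss_idx = int(parts[1])
--         step_part = parts[0]
--         # Extract step type
--         step_mapping = {
--             "draft_agent": "draft",
--             "inspection_agent": "inspection",
--             "threshold_agent": "threshold",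
--             "unittest_agent": "unittest",
--             "completion_check_agent": "completion_check",
--         }
--         for key, step in step_mapping.items():
--             if step_part == key:
--                 return ss_idx, step
--     return 0, None
-- ===== SOURCE B (Python) =====
-- _STEPS = ("draft", "inspection", "threshold", "unittest", "completion_check")
--
-- def _parse_agent_name(agent_name: str) -> tuple:
--     """Parse agent name to get ss_idx and step type (forward whole-pattern match: no split)."""
--     for step in _STEPS:
--         prefix = step + "_agent_"
--         if agent_name.startswith(prefix):
--             rest = agent_name[len(prefix):]
--             if rest.isdigit():
--                 return int(rest), step
--     return 0, None
-- ===== Notes on version B (the rewrite author's own statement) =====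
-- stated objective: alternative
-- what changed: Drops the rsplit + mapping-table scan: B matches the whole name forward against the five full step patterns (startswith the pattern prefix, then an all-digits tail), never splitting the string; correct because a digit suffix contains no underscore, so A's rsplit point is exactly the underscore closing that prefix.
import Mathlib
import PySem

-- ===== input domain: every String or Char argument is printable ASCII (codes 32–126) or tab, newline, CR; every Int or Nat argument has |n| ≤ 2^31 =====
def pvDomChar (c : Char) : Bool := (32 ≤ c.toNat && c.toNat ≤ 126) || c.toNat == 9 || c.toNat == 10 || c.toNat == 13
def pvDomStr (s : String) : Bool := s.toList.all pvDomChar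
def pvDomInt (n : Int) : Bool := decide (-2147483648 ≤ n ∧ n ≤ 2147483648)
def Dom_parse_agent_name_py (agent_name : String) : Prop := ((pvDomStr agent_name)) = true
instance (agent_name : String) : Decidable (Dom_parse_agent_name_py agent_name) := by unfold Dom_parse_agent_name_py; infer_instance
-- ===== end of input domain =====

-- ===== PORT A =====
-- B replaces A's rsplit + mapping-table scan with a forward whole-pattern match ('alternative');
-- the equivalence is about the return value.
-- Hand-written port of str.rsplit("_", 1) (single-char sep, maxsplit 1); exact: one split at the
-- last '_' if present ('cs.reverse.idxOf' is its distance from the end), else the whole string.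
def pvRsplitUnderscore1 (cs : List Char) : List (List Char) :=
  if '_' ∈ cs then
    [cs.take (cs.length - cs.reverse.idxOf '_' - 1),
     cs.drop (cs.length - cs.reverse.idxOf '_')]
  else [cs]

-- the step_mapping dict, in insertion order
def pa_step_mapping : List (List Char × List Char) :=
  [("draft_agent".toList, "draft".toList),
   ("inspection_agent".toList, "inspection".toList),
   ("threshold_agent".toList, "threshold".toList),
   ("unittest_agent".toList, "unittest".toList),
   ("completion_check_agent".toList, "completion_check".toList)]

-- the 'for key, step in step_mapping.items()' loop with its early return
def pa_loop (step_part : List Char) (ss_idx : Int) :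
    List (List Char × List Char) → Option (Int × Option String)
  | [] => none
  | (key, step) :: rest =>
    if step_part = key then some (ss_idx, some (String.ofList step))
    else pa_loop step_part ss_idx rest

def parse_agent_name_py (agent_name : String) : Int × Option String :=
  match pvRsplitUnderscore1 agent_name.toList with
  | [p0, p1] =>
    if PySem.Chars.strIsdigit p1 then
      -- int(parts[1]) never raises here: isdigit guarantees a parse, so getD 0 is unreachable
      let ss_idx : Int := (PySem.Int.ofChars? p1).getD 0
      match pa_loop p0 ss_idx pa_step_mapping with
      | some r => r
      | none => (0, none)
    else (0, none)
  | _ => (0, none)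

-- ===== PORT B =====
-- the _STEPS tuple
def pb_steps : List (List Char) :=
  ["draft".toList, "inspection".toList, "threshold".toList,
   "unittest".toList, "completion_check".toList]

-- the 'for step in _STEPS' loop with its early return
def pb_loop (cs : List Char) : List (List Char) → Int × Option String
  | [] => (0, none)
  | step :: rest =>
    let pre := step ++ "_agent_".toList
    if PySem.Chars.startswith cs pre then
      let tail := PySem.List.slice cs (some (pre.length : Int)) none   -- agent_name[len(prefix):]
      if PySem.Chars.strIsdigit tail then
        ((PySem.Int.ofChars? tail).getD 0, some (String.ofList step))
      else pb_loop cs rest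
    else pb_loop cs rest

def parse_agent_name_py_alt (agent_name : String) : Int × Option String :=
  pb_loop agent_name.toList pb_steps

-- ===== PRECONDITION & SPEC =====
def Spec_parse_agent_name_py (agent_name : String) (out : Int × Option String) : Prop := out = parse_agent_name_py_alt agent_name
instance (agent_name : String) (out : Int × Option String) : Decidable (Spec_parse_agent_name_py agent_name out) := by unfold Spec_parse_agent_name_py; infer_instance

-- ===== CLAIM (what is proved, stated in full; the proofs are below) =====
def Claim_equal_parse_agent_name_py : Prop := ∀ (agent_name : String), Dom_parse_agent_name_py agent_name → Spec_parse_agent_name_py agent_name (parse_agent_name_py agent_name)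

-- ===== LEMMAS AND PROOFS =====

-- idxOf at the first occurrence after a clean prefix
theorem idxOf_append_cons (as bs : List Char) (h : '_' ∉ as) :
    (as ++ '_' :: bs).idxOf '_' = as.length := by
  induction as with
  | nil => simp
  | cons a t ih =>
    have ha : a ≠ '_' := fun hc => h (hc ▸ List.mem_cons_self)
    have ht : '_' ∉ t := fun hc => h (List.mem_cons_of_mem _ hc)
    simp [ha, ih ht]

-- rsplit("_",1) of a string whose final piece is underscore-free
theorem rsplit_append (xs ys : List Char) (h : '_' ∉ ys) :
    pvRsplitUnderscore1 (xs ++ '_' :: ys) = [xs, ys] := by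
  have hmem : '_' ∈ xs ++ '_' :: ys := List.mem_append_right _ List.mem_cons_self
  have hrev : (xs ++ '_' :: ys).reverse = ys.reverse ++ '_' :: xs.reverse := by simp
  have hidx : (xs ++ '_' :: ys).reverse.idxOf '_' = ys.length := by
    rw [hrev, idxOf_append_cons _ _ (by simpa using h)]; simp
  have hlen : (xs ++ '_' :: ys).length = xs.length + 1 + ys.length := by simp; omega
  unfold pvRsplitUnderscore1
  rw [if_pos hmem]
  have h1 : (xs ++ '_' :: ys).length - (xs ++ '_' :: ys).reverse.idxOf '_' - 1 = xs.length := by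
    rw [hidx, hlen]; omega
  have h2 : (xs ++ '_' :: ys).length - (xs ++ '_' :: ys).reverse.idxOf '_' = xs.length + 1 := by
    rw [hidx, hlen]; omega
  rw [h1, h2]
  congr 1
  · exact List.take_left
  · simp

-- rsplit("_",1) reconstruction: a two-piece result glues back with '_'
theorem rsplit_two (cs p0 p1 : List Char) (h : pvRsplitUnderscore1 cs = [p0, p1]) :
    cs = p0 ++ '_' :: p1 := by
  unfold pvRsplitUnderscore1 at h
  by_cases hmem : '_' ∈ cs
  · rw [if_pos hmem] at h
    have hmemr : '_' ∈ cs.reverse := by simpa using hmem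
    have hi : cs.reverse.idxOf '_' < cs.length := by
      simpa using List.idxOf_lt_length_of_mem hmemr
    have hk : cs.length - cs.reverse.idxOf '_' - 1 < cs.length := by omega
    have hget? : cs[cs.length - 1 - cs.reverse.idxOf '_']? = some '_' := by
      have hrg : cs.reverse[cs.reverse.idxOf '_']'(by simpa using hi) = '_' :=
        List.getElem_idxOf _
      rw [List.getElem_reverse] at hrg
      rw [List.getElem?_eq_getElem (by omega)]
      exact congrArg some hrg
    rw [show cs.length - 1 - cs.reverse.idxOf '_' = cs.length - cs.reverse.idxOf '_' - 1
          from by omega] at hget?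
    have hget : cs[cs.length - cs.reverse.idxOf '_' - 1]'hk = '_' := by
      rwa [List.getElem?_eq_getElem hk, Option.some_inj] at hget?
    have hp0 : p0 = cs.take (cs.length - cs.reverse.idxOf '_' - 1) := by
      injection h with h1 _; exact h1.symm
    have hp1 : p1 = cs.drop (cs.length - cs.reverse.idxOf '_') := by
      injection h with _ h2; injection h2 with h3 _; exact h3.symm
    have hd : cs.drop (cs.length - cs.reverse.idxOf '_' - 1) =
        '_' :: cs.drop (cs.length - cs.reverse.idxOf '_') := by
      rw [List.drop_eq_getElem_cons hk, hget,
          show cs.length - cs.reverse.idxOf '_' - 1 + 1 = cs.length - cs.reverse.idxOf '_'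
            from by omega]
    rw [hp0, hp1]
    calc cs = cs.take (cs.length - cs.reverse.idxOf '_' - 1) ++
              cs.drop (cs.length - cs.reverse.idxOf '_' - 1) := (List.take_append_drop _ _).symm
      _ = _ := by rw [hd]
  · rw [if_neg hmem] at h
    exact absurd h (by simp)

-- a Python-digit string contains no underscore
theorem strIsdigit_no_underscore (ys : List Char) (h : PySem.Chars.strIsdigit ys = true) :
    '_' ∉ ys := by
  intro hm
  simp only [PySem.Chars.strIsdigit, Bool.and_eq_true, List.all_eq_true] at h
  have := h.2 _ hm
  simp [PySem.Chars.isdigit] at this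

-- A's table loop hits exactly its key's entry
theorem pa_loop_self (key step : List Char) (c : Int)
    (h : (key, step) ∈ pa_step_mapping) :
    pa_loop key c pa_step_mapping = some (c, some (String.ofList step)) := by
  simp only [pa_step_mapping, List.mem_cons, List.not_mem_nil, or_false, Prod.mk.injEq] at h
  rcases h with ⟨h1, h2⟩ | ⟨h1, h2⟩ | ⟨h1, h2⟩ | ⟨h1, h2⟩ | ⟨h1, h2⟩ <;> subst h1 <;> subst h2 <;>
    simp only [pa_loop, pa_step_mapping] <;> simp

-- inversion of A's table loop
theorem pa_loop_some (p0 : List Char) (c : Int) (tbl : List (List Char × List Char))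
    (r : Int × Option String) (h : pa_loop p0 c tbl = some r) :
    ∃ key step, (key, step) ∈ tbl ∧ p0 = key ∧ r = (c, some (String.ofList step)) := by
  induction tbl with
  | nil => simp [pa_loop] at h
  | cons kv rest ih =>
    obtain ⟨key, step⟩ := kv
    simp only [pa_loop] at h
    by_cases hk : p0 = key
    · rw [if_pos hk] at h
      exact ⟨key, step, List.mem_cons_self, hk, (Option.some_inj.mp h).symm⟩
    · rw [if_neg hk] at h
      obtain ⟨k, s, hm, hp, hr⟩ := ih h
      exact ⟨k, s, List.mem_cons_of_mem _ hm, hp, hr⟩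

-- B's loop returns the default when no pattern matches
theorem pb_loop_default (cs : List Char) (steps : List (List Char))
    (h : ∀ step ∈ steps, ¬(PySem.Chars.startswith cs (step ++ "_agent_".toList) = true ∧
          PySem.Chars.strIsdigit (cs.drop (step ++ "_agent_".toList).length) = true)) :
    pb_loop cs steps = (0, none) := by
  induction steps with
  | nil => rfl
  | cons step rest ih =>
    have hs := h step List.mem_cons_self
    have hr : ∀ s ∈ rest, _ := fun s hm => h s (List.mem_cons_of_mem _ hm)
    simp only [pb_loop, PySem.List.slice_from_natCast]
    by_cases h1 : PySem.Chars.startswith cs (step ++ "_agent_".toList) = true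
    · rw [if_pos h1]
      have h2 : ¬ PySem.Chars.strIsdigit (cs.drop (step ++ "_agent_".toList).length) = true :=
        fun hd => hs ⟨h1, hd⟩
      rw [if_neg h2]
      exact ih hr
    · rw [if_neg h1]
      exact ih hr

-- the matching condition both programs recognise: some '<step>_agent_' prefix with a digit tail
def pvMatches (cs : List Char) : Prop :=
  ∃ step ∈ pb_steps, PySem.Chars.startswith cs (step ++ "_agent_".toList) = true ∧
    PySem.Chars.strIsdigit (cs.drop (step ++ "_agent_".toList).length) = true

-- A's value on a matched input
theorem a_hit (s : String) (step ys : List Char) (hstep : step ∈ pb_steps)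
    (hcs : s.toList = step ++ "_agent_".toList ++ ys)
    (hys : PySem.Chars.strIsdigit ys = true) :
    parse_agent_name_py s = ((PySem.Int.ofChars? ys).getD 0, some (String.ofList step)) := by
  have hkey : (step ++ "_agent".toList, step) ∈ pa_step_mapping := by
    simp only [pb_steps, List.mem_cons, List.not_mem_nil, or_false] at hstep
    rcases hstep with h | h | h | h | h <;> subst h <;> decide
  have hglue : step ++ "_agent_".toList ++ ys = (step ++ "_agent".toList) ++ '_' :: ys := by
    simp
  unfold parse_agent_name_py
  rw [hcs, hglue, rsplit_append _ _ (strIsdigit_no_underscore _ hys)]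
  dsimp only
  rw [if_pos hys, pa_loop_self _ _ _ hkey]

-- xs[len(xs):] of a concatenation is the tail
theorem slice_append_length (xs ys : List Char) :
    PySem.List.slice (xs ++ ys) (some ((xs.length : Nat) : Int)) none = ys := by
  rw [PySem.List.slice_from_natCast, List.drop_left]

-- B's value on a matched input
theorem b_hit (s : String) (step ys : List Char) (hstep : step ∈ pb_steps)
    (hcs : s.toList = step ++ "_agent_".toList ++ ys)
    (hys : PySem.Chars.strIsdigit ys = true) :
    parse_agent_name_py_alt s = ((PySem.Int.ofChars? ys).getD 0, some (String.ofList step)) := by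
  simp only [pb_steps, List.mem_cons, List.not_mem_nil, or_false] at hstep
  unfold parse_agent_name_py_alt
  rw [hcs]
  rcases hstep with h | h | h | h | h <;> subst h <;> simp only [pb_loop, pb_steps]
  · rw [if_pos (by simp [PySem.Chars.startswith, List.isPrefixOf]),
        slice_append_length, if_pos hys]
  · rw [if_neg (by simp [PySem.Chars.startswith, List.isPrefixOf]),
        if_pos (by simp [PySem.Chars.startswith, List.isPrefixOf]),
        slice_append_length, if_pos hys]
  · rw [if_neg (by simp [PySem.Chars.startswith, List.isPrefixOf]),
        if_neg (by simp [PySem.Chars.startswith, List.isPrefixOf]),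
        if_pos (by simp [PySem.Chars.startswith, List.isPrefixOf]),
        slice_append_length, if_pos hys]
  · rw [if_neg (by simp [PySem.Chars.startswith, List.isPrefixOf]),
        if_neg (by simp [PySem.Chars.startswith, List.isPrefixOf]),
        if_neg (by simp [PySem.Chars.startswith, List.isPrefixOf]),
        if_pos (by simp [PySem.Chars.startswith, List.isPrefixOf]),
        slice_append_length, if_pos hys]
  · rw [if_neg (by simp [PySem.Chars.startswith, List.isPrefixOf]),
        if_neg (by simp [PySem.Chars.startswith, List.isPrefixOf]),
        if_neg (by simp [PySem.Chars.startswith, List.isPrefixOf]),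
        if_neg (by simp [PySem.Chars.startswith, List.isPrefixOf]),
        if_pos (by simp [PySem.Chars.startswith, List.isPrefixOf]),
        slice_append_length, if_pos hys]

-- ===== VERDICT (by name: the statement is the Claim_ definition above) =====
theorem parse_agent_name_py_spec : Claim_equal_parse_agent_name_py := by
  intro agent_name _
  unfold Spec_parse_agent_name_py
  by_cases hm : pvMatches agent_name.toList
  · obtain ⟨step, hstep, hsw, hdig⟩ := hm
    obtain ⟨ys, hys⟩ := (PySem.Chars.startswith_iff _ _).mp hsw
    have hcs : agent_name.toList = step ++ "_agent_".toList ++ ys := by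
      exact hys.symm
    have hdig' : PySem.Chars.strIsdigit ys = true := by
      rwa [hcs, List.drop_left] at hdig
    rw [a_hit _ _ _ hstep hcs hdig', b_hit _ _ _ hstep hcs hdig']
  · -- no pattern matches: B is the default, and A cannot leave the default either
    have hB : parse_agent_name_py_alt agent_name = (0, none) := by
      unfold parse_agent_name_py_alt
      refine pb_loop_default _ _ ?_
      intro step hstep hc
      exact hm ⟨step, hstep, hc.1, hc.2⟩
    rw [hB]
    unfold parse_agent_name_py
    cases hsplit : pvRsplitUnderscore1 agent_name.toList with
    | nil => rfl
    | cons p0 rest =>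
      cases rest with
      | nil => rfl
      | cons p1 rest2 =>
        cases rest2 with
        | cons _ _ => rfl
        | nil =>
          dsimp only
          by_cases hd : PySem.Chars.strIsdigit p1 = true
          · rw [if_pos hd]
            cases hloop : pa_loop p0 ((PySem.Int.ofChars? p1).getD 0) pa_step_mapping with
            | none => rfl
            | some r =>
              exfalso
              obtain ⟨key, step, hmemk, hp0, _⟩ := pa_loop_some _ _ _ _ hloop
              have hpair : (key = "draft_agent".toList ∧ step = "draft".toList) ∨
                  (key = "inspection_agent".toList ∧ step = "inspection".toList) ∨
                  (key = "threshold_agent".toList ∧ step = "threshold".toList) ∨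
                  (key = "unittest_agent".toList ∧ step = "unittest".toList) ∨
                  (key = "completion_check_agent".toList ∧ step = "completion_check".toList) := by
                simpa [pa_step_mapping, Prod.mk.injEq] using hmemk
              have hglue : key ++ '_' :: p1 = step ++ "_agent_".toList ++ p1 := by
                rcases hpair with ⟨h1, h2⟩ | ⟨h1, h2⟩ | ⟨h1, h2⟩ | ⟨h1, h2⟩ | ⟨h1, h2⟩ <;>
                  subst h1 <;> subst h2 <;> simp
              have hstep : step ∈ pb_steps := by
                rcases hpair with ⟨_, h2⟩ | ⟨_, h2⟩ | ⟨_, h2⟩ | ⟨_, h2⟩ | ⟨_, h2⟩ <;>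
                  subst h2 <;> simp [pb_steps]
              have hcs : agent_name.toList = step ++ "_agent_".toList ++ p1 := by
                rw [rsplit_two _ _ _ hsplit, hp0, hglue]
              refine hm ⟨step, hstep, ?_, ?_⟩
              · rw [hcs]
                exact (PySem.Chars.startswith_iff _ _).mpr ⟨p1, by simp⟩
              · rw [hcs, List.drop_left]
                exact hd
          · rw [if_neg hd]
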